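-- pv_equiv track=rewrite | github.com/wnsrb003/SW_JUNGLE | codingtest/programmers/miso/2.py | solution
-- ===== SOURCE A (Python) =====
-- def solution(S):
--     # write your code in Python 3.6
--     maxLength = 0
--     cnt = 1
--     dic = []
--     for i in range(len(S)):
--         if (i == len(S)-1):
--             dic.append(cnt)
--             maxLength = max(maxLength, cnt)
--         else:
--             if (S[i] == S[i+1]):
--                 cnt += 1
--             else:
--                 dic.append(cnt)
--                 maxLength = max(maxLength, cnt)
--                 cnt = 1
--     result = 0
--     while(dic):
--         result += maxLength - dic.pop()
--     return result
-- ===== SOURCE B (Python) =====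
-- def solution(S):
--     # Change-point decomposition: collect the indices where the character changes,
--     # read runs as gaps between consecutive cut positions, then numRuns*maxRun - n.
--     n = len(S)
--     if n == 0:
--         return 0
--     cuts = [0] + [i for i in range(1, n) if S[i] != S[i - 1]] + [n]
--     max_run = max(b - a for a, b in zip(cuts, cuts[1:]))
--     return (len(cuts) - 1) * max_run - n
-- ===== Notes on version B (the rewrite author's own statement) =====
-- stated objective: alternative
-- what changed: B replaces A's counter-accumulating scan plus trailing while-pop loop by a change-point decomposition: it collects the indices where the character changes, reads runs as gaps between consecutive cut positions, and returns (numRuns*maxRun - len(S)).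
import Mathlib
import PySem

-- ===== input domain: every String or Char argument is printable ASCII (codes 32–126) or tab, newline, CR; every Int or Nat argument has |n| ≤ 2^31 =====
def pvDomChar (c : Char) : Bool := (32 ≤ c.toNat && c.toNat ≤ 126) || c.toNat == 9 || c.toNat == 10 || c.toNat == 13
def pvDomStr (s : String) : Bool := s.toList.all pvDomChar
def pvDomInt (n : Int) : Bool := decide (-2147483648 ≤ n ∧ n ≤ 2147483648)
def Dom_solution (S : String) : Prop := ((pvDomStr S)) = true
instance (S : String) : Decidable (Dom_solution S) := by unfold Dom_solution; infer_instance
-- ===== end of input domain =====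

-- B replaces A's counter-accumulating scan plus trailing while-pop loop by a change-point
-- decomposition (cut indices, runs as gaps, one formula); same return values, same cost.

-- ===== PORT A =====
-- literal port of A: index loop with lookahead building dic and maxLength,
-- then the while-pop loop (pop() takes from the end, i.e. iterates dic reversed)
def solution (S : String) : Int :=
  let cs := S.toList
  let n : Int := cs.length
  let fin := (PySem.List.pyRange 0 n 1).foldl
    (fun (st : Int × Int × List Int) i =>
      if i == n - 1 then (max st.1 st.2.1, st.2.1, st.2.2 ++ [st.2.1])
      else if PySem.List.pyGetD cs i ' ' == PySem.List.pyGetD cs (i + 1) ' ' then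
        (st.1, st.2.1 + 1, st.2.2)
      else (max st.1 st.2.1, 1, st.2.2 ++ [st.2.1]))
    (0, 1, [])
  fin.2.2.reverse.foldl (fun r d => r + (fin.1 - d)) 0

-- ===== PORT B =====
-- literal port of Source B: cut-index list, runs as gaps between consecutive cuts, one formula.
-- cuts[1:] is the list slice = drop 1 (exact); Python's max(...) over the gap list is
-- max? … .getD 0 — the default is unreachable since cuts always has ≥ 2 elements.
def solution_alt (S : String) : Int :=
  let cs := S.toList
  let n : Int := cs.length
  if n == 0 then 0
  else
    let cuts : List Int := [0] ++ (PySem.List.pyRange 1 n 1).filter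
        (fun i => PySem.List.pyGetD cs i ' ' != PySem.List.pyGetD cs (i - 1) ' ') ++ [n]
    let maxRun := (PySem.List.max? ((cuts.zip (cuts.drop 1)).map (fun p => p.2 - p.1))
        (fun y => y)).getD 0
    ((cuts.length : Int) - 1) * maxRun - n

-- ===== PRECONDITION & SPEC =====
def Spec_solution (S : String) (out : Int) : Prop := out = solution_alt S
instance (S : String) (out : Int) : Decidable (Spec_solution S out) := by unfold Spec_solution; infer_instance

-- ===== CLAIM (what is proved, stated in full; the proofs are below) =====
def Claim_equal_solution : Prop := ∀ (S : String), Dom_solution S → Spec_solution S (solution S)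

-- ===== LEMMAS AND PROOFS =====

-- reference run-length list: runsAux prev cnt rest = run lengths of prev-run-so-far ++ rest
def runsAux (c : Char) (cnt : Int) : List Char → List Int
  | [] => [cnt]
  | b :: rest => if c == b then runsAux b (cnt + 1) rest else cnt :: runsAux b 1 rest

-- change points: indices (starting at i) where the character differs from its predecessor
def chgs (i : Int) (c : Char) : List Char → List Int
  | [] => []
  | b :: rest => if c == b then chgs (i + 1) b rest else i :: chgs (i + 1) b rest

-- A's loop body restricted to the non-last case, as a fold over adjacent pairs
def bodyPair (st : Int × Int × List Int) (p : Char × Char) : Int × Int × List Int :=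
  if p.1 == p.2 then (st.1, st.2.1 + 1, st.2.2)
  else (max st.1 st.2.1, 1, st.2.2 ++ [st.2.1])

theorem runsAux_ne_nil (rest : List Char) (c : Char) (cnt : Int) : runsAux c cnt rest ≠ [] := by
  induction rest generalizing c cnt with
  | nil => simp [runsAux]
  | cons b rest ih =>
    by_cases h : c = b
    · rw [runsAux, if_pos (by simpa using h)]; exact ih b (cnt + 1)
    · rw [runsAux, if_neg (by simpa using h)]; simp

theorem runsAux_pos (rest : List Char) (c : Char) (cnt : Int) (h : 1 ≤ cnt) :
    ∀ x ∈ runsAux c cnt rest, 1 ≤ x := by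
  induction rest generalizing c cnt with
  | nil => simpa [runsAux] using h
  | cons b rest ih =>
    by_cases hcb : c = b
    · rw [runsAux, if_pos (by simpa using hcb)]
      exact ih b (cnt + 1) (by omega)
    · rw [runsAux, if_neg (by simpa using hcb)]
      intro x hx
      rcases List.mem_cons.1 hx with rfl | hx
      · exact h
      · exact ih b 1 le_rfl x hx

theorem runsAux_sum (rest : List Char) (c : Char) (cnt : Int) :
    (runsAux c cnt rest).sum = cnt + rest.length := by
  induction rest generalizing c cnt with
  | nil => simp [runsAux]
  | cons b rest ih =>
    by_cases hcb : c = b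
    · rw [runsAux, if_pos (by simpa using hcb), ih]
      simp only [List.length_cons]; push_cast; ring
    · rw [runsAux, if_neg (by simpa using hcb)]
      simp only [List.sum_cons, ih, List.length_cons]; push_cast; ring

-- the pair fold computes the run list and their running max
theorem pairFold_spec (rest : List Char) (c : Char) (maxL cnt : Int) (dic : List Int) :
    (((c :: rest).zip rest).foldl bodyPair (maxL, cnt, dic)).2.2
        ++ [(((c :: rest).zip rest).foldl bodyPair (maxL, cnt, dic)).2.1]
      = dic ++ runsAux c cnt rest
    ∧ max (((c :: rest).zip rest).foldl bodyPair (maxL, cnt, dic)).1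
        (((c :: rest).zip rest).foldl bodyPair (maxL, cnt, dic)).2.1
      = (runsAux c cnt rest).foldl max maxL := by
  induction rest generalizing c maxL cnt dic with
  | nil => simp [runsAux]
  | cons b rest ih =>
    rw [List.zip_cons_cons, List.foldl_cons]
    by_cases hcb : c = b
    · rw [show bodyPair (maxL, cnt, dic) (c, b) = (maxL, cnt + 1, dic) from by
        simp [bodyPair, hcb]]
      rw [runsAux, if_pos (by simpa using hcb)]
      exact ih b maxL (cnt + 1) dic
    · rw [show bodyPair (maxL, cnt, dic) (c, b) = (max maxL cnt, 1, dic ++ [cnt]) from by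
        simp [bodyPair, hcb]]
      rw [runsAux, if_neg (by simpa using hcb)]
      have h1 := ih b (max maxL cnt) 1 (dic ++ [cnt])
      refine ⟨?_, ?_⟩
      · rw [h1.1, List.append_assoc, List.singleton_append]
      · rw [List.foldl_cons]; exact h1.2

-- index-with-lookahead fold over range(len) equals a fold over adjacent pairs
theorem foldIdx_pairs {σ : Type} (cs : List Char) (c : Char) (f : σ → Char → Char → σ) (init : σ) :
    (List.range cs.length).foldl
        (fun st k => f st ((c :: cs).getD k ' ') ((c :: cs).getD (k + 1) ' ')) init
      = ((c :: cs).zip cs).foldl (fun st p => f st p.1 p.2) init := by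
  induction cs generalizing c init with
  | nil => simp
  | cons b rest ih =>
    rw [show (b :: rest).length = rest.length + 1 from rfl, List.range_succ_eq_map]
    simp only [List.foldl_cons, List.foldl_map, List.getD_cons_succ, List.getD_cons_zero,
      List.zip_cons_cons]
    exact ih b (f init c b)

-- the accumulation 'result += M - d' over any list is a closed formula
theorem popFold (l : List Int) (M : Int) : ∀ r : Int,
    l.foldl (fun r d => r + (M - d)) r = r + (l.length : Int) * M - l.sum := by
  induction l with
  | nil => intro r; simp
  | cons d t ih =>
    intro r
    simp only [List.foldl_cons, List.sum_cons, List.length_cons, ih]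
    push_cast; ring

-- B's filtered index list (change points of cs[k+1] vs cs[k]) equals chgs
theorem filterIdx_chgs (rest : List Char) (c : Char) (off : Int) :
    (((List.range rest.length).filter
        (fun k => (c :: rest).getD (k + 1) ' ' != (c :: rest).getD k ' ')).map
      (fun (k : Nat) => off + (k : Int) + 1))
    = chgs (off + 1) c rest := by
  induction rest generalizing c off with
  | nil => simp [chgs]
  | cons b rest ih =>
    rw [show (b :: rest).length = rest.length + 1 from rfl, List.range_succ_eq_map]
    rw [List.filter_cons]
    have hmap : ((fun (k : Nat) => off + (k : Int) + 1) ∘ Nat.succ)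
        = (fun (k : Nat) => (off + 1) + (k : Int) + 1) := by
      funext k; simp [Function.comp, Nat.succ_eq_add_one]; ring
    have hpred : ((fun (k : Nat) =>
          (c :: b :: rest).getD (k + 1) ' ' != (c :: b :: rest).getD k ' ') ∘ Nat.succ)
        = (fun (k : Nat) => (b :: rest).getD (k + 1) ' ' != (b :: rest).getD k ' ') := by
      funext k; simp [Function.comp, Nat.succ_eq_add_one]
    by_cases hcb : c = b
    · subst hcb
      rw [if_neg (by simp)]
      rw [List.filter_map, List.map_map, hmap, hpred, chgs, if_pos (by simp)]
      exact ih c (off + 1)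
    · rw [if_pos (by simpa using fun h : b = c => hcb h.symm)]
      rw [List.map_cons, List.filter_map, List.map_map, hmap, hpred, chgs,
        if_neg (by simpa using hcb)]
      simp only [Nat.cast_zero, add_zero]
      congr 1
      exact ih b (off + 1)

-- gaps between consecutive cut positions are exactly the run lengths
theorem gaps_runsAux (rest : List Char) (c : Char) (last i : Int) :
    (((last :: (chgs i c rest ++ [i + rest.length])).zip
        (chgs i c rest ++ [i + rest.length])).map (fun p => p.2 - p.1))
      = runsAux c (i - last) rest := by
  induction rest generalizing c last i with
  | nil => simp [chgs, runsAux]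
  | cons b rest ih =>
    by_cases hcb : c = b
    · rw [chgs, if_pos (by simpa using hcb), runsAux, if_pos (by simpa using hcb)]
      have := ih b last (i + 1)
      rw [show i - last + 1 = i + 1 - last from by ring,
          show (i + ((b :: rest).length : Int)) = (i + 1) + rest.length from by
            simp; ring]
      exact this
    · rw [chgs, if_neg (by simpa using hcb), runsAux, if_neg (by simpa using hcb)]
      rw [List.cons_append, List.zip_cons_cons, List.map_cons]
      congr 1
      have := ih b i (i + 1)
      rw [show (i + 1) - i = (1 : Int) from by ring] at this
      rw [show (i + ((b :: rest).length : Int)) = (i + 1) + rest.length from by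
            simp; ring]
      exact this

-- max with default 0 of a nonempty list of positive ints is the running max from 0
theorem maxD_eq_foldl (l : List Int) (hne : l ≠ []) (hpos : ∀ x ∈ l, (1 : Int) ≤ x) :
    (PySem.List.max? l (fun y => y)).getD 0 = l.foldl max 0 := by
  cases l with
  | nil => exact absurd rfl hne
  | cons r0 t =>
    rw [PySem.List.max?_id_cons]
    have h0 : max 0 r0 = r0 := max_eq_right (by linarith [hpos r0 (by simp)])
    simp [h0]

-- foldl congruence on members (used to drop the never-true last-index test and to shift casts)
theorem foldl_congr_mem' {α β : Type} (l : List α) (f g : β → α → β) (init : β)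
    (h : ∀ acc x, x ∈ l → f acc x = g acc x) : l.foldl f init = l.foldl g init := by
  induction l generalizing init with
  | nil => rfl
  | cons a t ih =>
    simp only [List.foldl_cons]
    rw [h init a (by simp)]
    exact ih _ (fun acc x hx => h acc x (List.mem_cons_of_mem a hx))

-- ===== VERDICT (by name: the statement is the Claim_ definition above) =====
theorem solution_spec : Claim_equal_solution := by
  intro S _
  unfold Spec_solution
  cases h : S.toList with
  | nil =>
    simp [solution, solution_alt, h, PySem.List.pyRange]
  | cons c rest =>
    -- A side: solution S = |runs| * max runs - sum runs
    have hA : solution S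
        = ((runsAux c 1 rest).length : Int) * ((runsAux c 1 rest).foldl max 0)
          - (runsAux c 1 rest).sum := by
      simp only [solution, h]
      have hn : ((c :: rest).length : Int) = (rest.length : Int) + 1 := by
        simp
      rw [hn, PySem.List.pyRange_one_succ_right (by positivity), List.foldl_append]
      have hinner :
          (PySem.List.pyRange 0 (rest.length : Int) 1).foldl
            (fun (st : Int × Int × List Int) i =>
              if i == (rest.length : Int) + 1 - 1 then (max st.1 st.2.1, st.2.1, st.2.2 ++ [st.2.1])
              else if PySem.List.pyGetD (c :: rest) i ' ' == PySem.List.pyGetD (c :: rest) (i + 1) ' '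
                then (st.1, st.2.1 + 1, st.2.2)
                else (max st.1 st.2.1, 1, st.2.2 ++ [st.2.1]))
            (0, 1, [])
          = ((c :: rest).zip rest).foldl bodyPair (0, 1, ([] : List Int)) := by
        rw [foldl_congr_mem' _ _
          (fun (st : Int × Int × List Int) i =>
            if PySem.List.pyGetD (c :: rest) i ' ' == PySem.List.pyGetD (c :: rest) (i + 1) ' '
            then (st.1, st.2.1 + 1, st.2.2)
            else (max st.1 st.2.1, 1, st.2.2 ++ [st.2.1])) _
          (by
            intro acc x hx
            have hx' := (PySem.List.mem_pyRange_one).1 hx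
            have hne : ¬ (x = (rest.length : Int) + 1 - 1) := by omega
            rw [if_neg (by simpa using hne)])]
        rw [PySem.List.pyRange_one, List.foldl_map]
        simp only [sub_zero, Int.toNat_natCast, zero_add]
        rw [foldl_congr_mem' _ _
          (fun (st : Int × Int × List Int) (k : Nat) =>
            if ((c :: rest).getD k ' ') == ((c :: rest).getD (k + 1) ' ')
            then (st.1, st.2.1 + 1, st.2.2)
            else (max st.1 st.2.1, 1, st.2.2 ++ [st.2.1])) _
          (by
            intro acc k hk
            rw [show ((k : Int) + 1) = ((k + 1 : Nat) : Int) from by push_cast; ring,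
              PySem.List.pyGetD_natCast, PySem.List.pyGetD_natCast])]
        rw [foldIdx_pairs rest c
          (fun (st : Int × Int × List Int) a b =>
            if a == b then (st.1, st.2.1 + 1, st.2.2)
            else (max st.1 st.2.1, 1, st.2.2 ++ [st.2.1])) (0, 1, [])]
        rfl
      rw [hinner]
      have hsp := pairFold_spec rest c 0 1 []
      simp only [List.nil_append] at hsp
      simp only [List.foldl_cons, List.foldl_nil]
      rw [show (((rest.length : Int)) == (rest.length : Int) + 1 - 1) = true from by simp]
      simp only [if_true, hsp.1, hsp.2]
      rw [popFold]
      simp [List.sum_reverse]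
    -- B side: the cut list is 0 :: chgs 1 c rest ++ [n], its gaps are the runs
    have hfil : (PySem.List.pyRange 1 ((c :: rest).length : Int) 1).filter
          (fun i => PySem.List.pyGetD (c :: rest) i ' ' != PySem.List.pyGetD (c :: rest) (i - 1) ' ')
        = chgs 1 c rest := by
      rw [PySem.List.pyRange_one, List.filter_map]
      rw [show ((((c :: rest).length : Int)) - 1).toNat = rest.length from by simp]
      have hpred : ((fun i => PySem.List.pyGetD (c :: rest) i ' '
              != PySem.List.pyGetD (c :: rest) (i - 1) ' ') ∘ (fun (k : Nat) => (1 : Int) + (k : Int)))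
          = (fun (k : Nat) => (c :: rest).getD (k + 1) ' ' != (c :: rest).getD k ' ') := by
        funext k
        simp only [Function.comp]
        rw [show (1 + (k : Int)) = ((k + 1 : Nat) : Int) from by push_cast; ring]
        rw [show (((k + 1 : Nat) : Int) - 1 : Int) = ((k : Nat) : Int) from by push_cast; ring]
        rw [PySem.List.pyGetD_natCast, PySem.List.pyGetD_natCast]
      rw [hpred]
      have h0 := filterIdx_chgs rest c 0
      rw [show ((0 : Int) + 1) = 1 from by ring] at h0
      rw [show (fun (k : Nat) => (1 : Int) + (k : Int))
            = (fun (k : Nat) => (0 : Int) + (k : Int) + 1) from by funext k; ring]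
      exact h0
    have hB : solution_alt S
        = ((runsAux c 1 rest).length : Int)
            * ((PySem.List.max? (runsAux c 1 rest) (fun y => y)).getD 0)
          - ((c :: rest).length : Int) := by
      simp only [solution_alt, h]
      rw [if_neg (by simp [List.length_cons]; omega)]
      rw [hfil]
      have hg := gaps_runsAux rest c 0 1
      rw [show ((1 : Int) - 0) = 1 from by ring] at hg
      rw [show ((1 : Int) + (rest.length : Int)) = ((c :: rest).length : Int) from by
            simp; ring] at hg
      rw [show ([0] ++ chgs 1 c rest ++ [((c :: rest).length : Int)])
            = 0 :: (chgs 1 c rest ++ [((c :: rest).length : Int)]) from by simp]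
      rw [show (0 :: (chgs 1 c rest ++ [((c :: rest).length : Int)])).drop 1
            = chgs 1 c rest ++ [((c :: rest).length : Int)] from rfl]
      rw [hg]
      have hlen : ((0 :: (chgs 1 c rest ++ [((c :: rest).length : Int)])).length : Int) - 1
          = ((runsAux c 1 rest).length : Int) := by
        have : (runsAux c 1 rest).length
            = (chgs 1 c rest ++ [((c :: rest).length : Int)]).length := by
          rw [← hg]; simp
        rw [this]; simp
      rw [hlen]
    rw [hA, hB, maxD_eq_foldl _ (runsAux_ne_nil rest c 1) (runsAux_pos rest c 1 le_rfl),
      runsAux_sum]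
    simp only [List.length_cons]
    push_cast
    ring
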